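-- pv_equiv track=rewrite | github.com/akashdip2001/TCS-CodeVita | codes/Orchard.py | longest_zeros
-- ===== SOURCE A (Python) =====
-- def longest_zeros(ashok_row, anand_row):
--     def count_possibilities(row):
--         n = len(row)
--         possibilities = 0
--
--         for i in range(n):
--             for j in range(i + 1, n):
--                 for k in range(j + 1, n):
--                     if row[i] != row[j] and row[j] != row[k] and row[i] != row[k]:
--                         possibilities += 1
--         return possibilities
--
--     ashok_possibilities = count_possibilities(ashok_row)
--     anand_possibilities = count_possibilities(anand_row)
--
--     if ashok_possibilities > anand_possibilities:
--         return "Ashok"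
--     elif anand_possibilities > ashok_possibilities:
--         return "Anand"
--     else:
--         return "Draw"
-- ===== SOURCE B (Python) =====
-- def longest_zeros(ashok_row, anand_row):
--     def count_possibilities(row):
--         # one pass: for each new element x, the triples it completes are the
--         # distinct-value pairs already seen that avoid x's value
--         counts = {}
--         seen = 0    # elements seen so far
--         pairs = 0   # pairs (i<j) with row[i] != row[j] seen so far
--         total = 0   # triples with pairwise-distinct values seen so far
--         for x in row:
--             c = counts.get(x, 0)
--             total += pairs - c * (seen - c)
--             pairs += seen - c
--             counts[x] = c + 1
--             seen += 1
--         return total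
--
--     ashok_possibilities = count_possibilities(ashok_row)
--     anand_possibilities = count_possibilities(anand_row)
--
--     if ashok_possibilities > anand_possibilities:
--         return "Ashok"
--     elif anand_possibilities > ashok_possibilities:
--         return "Anand"
--     else:
--         return "Draw"
-- ===== Notes on version B (the rewrite author's own statement) =====
-- stated objective: faster
-- what changed: replaces the triple nested index loop with a single pass that maintains a value-frequency dict, the running count of distinct-value pairs and of distinct-value triples
import Mathlib
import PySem

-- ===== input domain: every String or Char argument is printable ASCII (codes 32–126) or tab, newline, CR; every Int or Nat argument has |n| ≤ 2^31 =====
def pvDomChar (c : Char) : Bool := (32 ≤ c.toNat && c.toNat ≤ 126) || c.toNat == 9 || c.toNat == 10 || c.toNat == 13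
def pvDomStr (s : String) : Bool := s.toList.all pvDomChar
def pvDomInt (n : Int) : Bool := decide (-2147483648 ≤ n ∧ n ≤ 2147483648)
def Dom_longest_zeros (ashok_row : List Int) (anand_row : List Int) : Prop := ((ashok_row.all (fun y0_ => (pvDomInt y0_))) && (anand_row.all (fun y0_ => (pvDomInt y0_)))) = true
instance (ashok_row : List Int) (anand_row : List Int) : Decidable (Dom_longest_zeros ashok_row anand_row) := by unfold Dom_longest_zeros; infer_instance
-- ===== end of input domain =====

-- B replaces A's triple nested index loop by a single pass keeping a frequency dict,
-- the running number of distinct-value pairs and of distinct-value triples (O(n^3) → O(n)).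

-- ===== PORT A =====
-- count_possibilities: triple nested loop over index ranges, literal transliteration
def pvCountA (row : List Int) : Int :=
  let n : Int := (row.length : Int)
  (PySem.List.pyRange 0 n 1).foldl (fun poss i =>
    (PySem.List.pyRange (i + 1) n 1).foldl (fun poss j =>
      (PySem.List.pyRange (j + 1) n 1).foldl (fun poss k =>
        if PySem.List.pyGet? row i ≠ PySem.List.pyGet? row j ∧
           PySem.List.pyGet? row j ≠ PySem.List.pyGet? row k ∧
           PySem.List.pyGet? row i ≠ PySem.List.pyGet? row k
        then poss + 1 else poss) poss) poss) 0

def longest_zeros (ashok_row : List Int) (anand_row : List Int) : String :=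
  let ashok_possibilities := pvCountA ashok_row
  let anand_possibilities := pvCountA anand_row
  if ashok_possibilities > anand_possibilities then "Ashok"
  else if anand_possibilities > ashok_possibilities then "Anand"
  else "Draw"

-- ===== PORT B =====
-- loop body of B: state = (counts, seen, pairs, total)
def pvStep (s : PySem.Dict Int Int × Int × Int × Int) (x : Int) :
    PySem.Dict Int Int × Int × Int × Int :=
  -- c = counts.get(x, 0)
  (s.1.insert x (s.1.getD x 0 + 1), s.2.1 + 1, s.2.2.1 + (s.2.1 - s.1.getD x 0),
   s.2.2.2 + (s.2.2.1 - s.1.getD x 0 * (s.2.1 - s.1.getD x 0)))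

def pvCountB (row : List Int) : Int :=
  (row.foldl pvStep (PySem.Dict.empty, 0, 0, 0)).2.2.2

def longest_zeros_alt (ashok_row : List Int) (anand_row : List Int) : String :=
  let ashok_possibilities := pvCountB ashok_row
  let anand_possibilities := pvCountB anand_row
  if ashok_possibilities > anand_possibilities then "Ashok"
  else if anand_possibilities > ashok_possibilities then "Anand"
  else "Draw"

-- ===== PRECONDITION & SPEC =====
def Spec_longest_zeros (ashok_row : List Int) (anand_row : List Int) (out : String) : Prop := out = longest_zeros_alt ashok_row anand_row
instance (ashok_row : List Int) (anand_row : List Int) (out : String) : Decidable (Spec_longest_zeros ashok_row anand_row out) := by unfold Spec_longest_zeros; infer_instance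

-- ===== CLAIM (what is proved, stated in full; the proofs are below) =====
def Claim_equal_longest_zeros : Prop := ∀ (ashok_row : List Int) (anand_row : List Int), Dom_longest_zeros ashok_row anand_row → Spec_longest_zeros ashok_row anand_row (longest_zeros ashok_row anand_row)

-- ===== LEMMAS AND PROOFS =====

-- spec-side triple/pair counters
def pvQ : List Int → Int → Int
  | [], _ => 0
  | y :: ys, x =>
      (if y ≠ x then ((ys.countP (fun z => z != x && z != y) : Nat) : Int) else 0) + pvQ ys x

def pvP : List Int → Int
  | [] => 0
  | x :: xs => ((xs.countP (fun y => y != x) : Nat) : Int) + pvP xs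

def pvT : List Int → Int
  | [] => 0
  | x :: xs => pvQ xs x + pvT xs

-- nested-sum form of A's loops
def pvInd (row : List Int) (i j k : Int) : Int :=
  if PySem.List.pyGet? row i ≠ PySem.List.pyGet? row j ∧
     PySem.List.pyGet? row j ≠ PySem.List.pyGet? row k ∧
     PySem.List.pyGet? row i ≠ PySem.List.pyGet? row k
  then 1 else 0

def pvA1 (row : List Int) (i j : Int) : Int :=
  ((PySem.List.pyRange (j + 1) (row.length : Int) 1).map (fun k => pvInd row i j k)).sum

def pvA2 (row : List Int) (i : Int) : Int :=
  ((PySem.List.pyRange (i + 1) (row.length : Int) 1).map (fun j => pvA1 row i j)).sum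

def pvA3 (row : List Int) : Int :=
  ((PySem.List.pyRange 0 (row.length : Int) 1).map (fun i => pvA2 row i)).sum

-- generic helpers -------------------------------------------------------------

lemma pv_foldl_ite {C : Int → Prop} [DecidablePred C] (l : List Int) (a : Int) :
    l.foldl (fun acc k => if C k then acc + 1 else acc) a
      = a + (l.map (fun k => if C k then (1:Int) else 0)).sum := by
  induction l generalizing a with
  | nil => simp
  | cons y ys ih => simp [List.foldl_cons, ih]; split_ifs <;> ring

lemma pv_pyRange_shift (a b : Int) :
    PySem.List.pyRange (a + 1) (b + 1) 1 = (PySem.List.pyRange a b 1).map (fun t => t + 1) := by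
  rw [PySem.List.pyRange_one, PySem.List.pyRange_one]
  have h : (b + 1 - (a + 1)) = b - a := by ring
  rw [h, List.map_map]
  exact List.map_congr_left (fun k _ => by simp [Function.comp]; ring)

lemma pv_sum_shift (a b : Int) (f : Int → Int) :
    ((PySem.List.pyRange (a + 1) (b + 1) 1).map f).sum
      = ((PySem.List.pyRange a b 1).map (fun t => f (t + 1))).sum := by
  rw [pv_pyRange_shift, List.map_map]; rfl

lemma pv_sum_congr {l : List Int} {f g : Int → Int} (h : ∀ t ∈ l, f t = g t) :
    (l.map f).sum = (l.map g).sum := by rw [List.map_congr_left h]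

lemma pv_sum_zero_succ (n : ℕ) (f : Int → Int) :
    ((PySem.List.pyRange 0 ((n : Int) + 1) 1).map f).sum
      = f 0 + ((PySem.List.pyRange 0 (n : Int) 1).map (fun t => f (t + 1))).sum := by
  rw [PySem.List.pyRange_one_cons (by positivity), List.map_cons, List.sum_cons]
  congr 1
  have h : PySem.List.pyRange 1 ((n : Int) + 1) 1
      = (PySem.List.pyRange 0 (n : Int) 1).map (fun t => t + 1) := by
    have := pv_pyRange_shift 0 (n : Int); simpa using this
  rw [show (0 : Int) + 1 = 1 from by ring, h, List.map_map]; rfl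

-- counting helpers ------------------------------------------------------------

lemma pv_countP_ne (l : List Int) (x : Int) :
    ((l.countP (fun y => y != x) : Nat) : Int) = (l.length : Int) - (l.count x : Int) := by
  induction l with
  | nil => simp
  | cons y ys ih =>
      by_cases h : y = x <;>
        simp [List.countP_cons, List.count_cons, h, bne_iff_ne] <;> push_cast <;> omega

lemma pv_countP_ne2 (l : List Int) (x y : Int) (hxy : x ≠ y) :
    ((l.countP (fun z => z != x && z != y) : Nat) : Int)
      = (l.length : Int) - (l.count x : Int) - (l.count y : Int) := by
  induction l with
  | nil => simp
  | cons z zs ih =>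
      by_cases h1 : z = x
      · subst h1
        simp [List.countP_cons, List.count_cons, hxy, bne_iff_ne]
        push_cast; omega
      · by_cases h2 : z = y <;>
          simp [List.countP_cons, List.count_cons, h1, h2, bne_iff_ne] <;> push_cast <;> omega

lemma pvQ_eq (l : List Int) (x : Int) :
    pvQ l x = pvP l - (l.count x : Int) * ((l.length : Int) - (l.count x : Int)) := by
  induction l with
  | nil => simp [pvQ, pvP]
  | cons y ys ih =>
      by_cases h : y = x
      · subst h
        rw [show pvQ (y :: ys) y = pvQ ys y by simp [pvQ], ih]
        simp only [pvP, List.count_cons_self, List.length_cons, pv_countP_ne]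
        push_cast; ring
      · rw [show pvQ (y :: ys) x
              = ((ys.countP (fun z => z != x && z != y) : Nat) : Int) + pvQ ys x by
            simp [pvQ, h], ih, pv_countP_ne2 ys x y (fun e => h e.symm)]
        have hcnt : (y :: ys).count x = ys.count x := by
          simp [List.count_cons, h, Ne.symm h]
        simp only [pvP, List.length_cons, pv_countP_ne, hcnt]
        push_cast; ring

lemma pvP_snoc (l : List Int) (x : Int) :
    pvP (l ++ [x]) = pvP l + ((l.countP (fun y => y != x) : Nat) : Int) := by
  induction l with
  | nil => simp [pvP]
  | cons y ys ih =>
      by_cases h : y = x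
      · subst h; simp [pvP, List.countP_append, List.countP_cons, ih]; push_cast; ring
      · simp [pvP, List.countP_append, List.countP_cons, ih, h, Ne.symm h, bne_iff_ne]
        push_cast; ring

lemma pvQ_snoc (l : List Int) (x y : Int) :
    pvQ (l ++ [x]) y = pvQ l y +
      (if x ≠ y then ((l.countP (fun w => w != y && w != x) : Nat) : Int) else 0) := by
  induction l with
  | nil => simp [pvQ]
  | cons w ws ih =>
      simp only [List.cons_append, pvQ, ih, List.countP_append, List.countP_cons]
      by_cases h1 : x = y <;> by_cases h2 : w = y <;> by_cases h3 : x = w <;>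
        simp [h1, h2, h3, bne_iff_ne, ne_comm] <;> push_cast <;> ring

lemma pvT_snoc (l : List Int) (x : Int) :
    pvT (l ++ [x]) = pvT l + pvQ l x := by
  induction l with
  | nil => simp [pvT, pvQ]
  | cons y ys ih =>
      have hfun : (fun w : Int => w != x && w != y) = (fun w => w != y && w != x) := by
        funext w; exact Bool.and_comm _ _
      simp only [List.cons_append, pvT, ih, pvQ_snoc]
      by_cases h : y = x
      · subst h; simp [pvQ]; ring
      · simp [pvQ, h, Ne.symm h, hfun]; ring

-- A-side: fold → sums → pvT ---------------------------------------------------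

lemma pvCountA_eq_A3 (row : List Int) : pvCountA row = pvA3 row := by
  unfold pvCountA pvA3 pvA2 pvA1 pvInd
  simp only [pv_foldl_ite, PySem.List.foldl_add]
  simp

lemma pv_get_natCast (x : Int) (xs : List Int) (i : Int) (h : 0 ≤ i) :
    PySem.List.pyGet? (x :: xs) (i + 1) = PySem.List.pyGet? xs i := by
  obtain ⟨m, rfl⟩ : ∃ m : ℕ, i = (m : Int) := ⟨i.toNat, (Int.toNat_of_nonneg h).symm⟩
  exact PySem.List.pyGet?_cons_succ x xs m

lemma pv_sum_cons_shift (x : Int) (xs : List Int) (f : Int → Int) :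
    ((PySem.List.pyRange 0 (((x :: xs).length : Nat) : Int) 1).map f).sum
      = f 0 + ((PySem.List.pyRange 0 ((xs.length : Nat) : Int) 1).map (fun t => f (t + 1))).sum := by
  have h : (((x :: xs).length : Nat) : Int) = ((xs.length : Nat) : Int) + 1 := by
    simp [List.length_cons]
  rw [h, pv_sum_zero_succ]

lemma pv_sum_shift1 (b : Int) (f : Int → Int) :
    ((PySem.List.pyRange 1 (b + 1) 1).map f).sum
      = ((PySem.List.pyRange 0 b 1).map (fun t => f (t + 1))).sum := by
  have := pv_sum_shift 0 b f; simpa using this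

lemma pv_C_sum (ys : List Int) (x y : Int) :
    ((PySem.List.pyRange 0 (ys.length : Int) 1).map (fun k =>
        if some x ≠ some y ∧ some y ≠ PySem.List.pyGet? ys k ∧ some x ≠ PySem.List.pyGet? ys k
        then (1:Int) else 0)).sum
      = if y ≠ x then ((ys.countP (fun z => z != x && z != y) : Nat) : Int) else 0 := by
  by_cases hxy : x = y
  · subst hxy; simp
  · rw [if_pos (fun e => hxy e.symm)]
    induction ys with
    | nil => simp
    | cons z zs ih =>
        rw [pv_sum_cons_shift]
        have hsh : ((PySem.List.pyRange 0 ((zs.length : Nat) : Int) 1).map (fun t =>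
            if some x ≠ some y ∧ some y ≠ PySem.List.pyGet? (z :: zs) (t + 1) ∧
               some x ≠ PySem.List.pyGet? (z :: zs) (t + 1) then (1:Int) else 0)).sum
            = ((PySem.List.pyRange 0 ((zs.length : Nat) : Int) 1).map (fun k =>
            if some x ≠ some y ∧ some y ≠ PySem.List.pyGet? zs k ∧
               some x ≠ PySem.List.pyGet? zs k then (1:Int) else 0)).sum := by
          refine pv_sum_congr (fun t ht => ?_)
          rw [pv_get_natCast z zs t (PySem.List.mem_pyRange_one.mp ht).1]
        rw [hsh, ih]
        simp only [PySem.List.pyGet?_zero_cons, List.countP_cons]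
        by_cases h1 : z = x
        · subst h1; simp [hxy]
        · by_cases h2 : z = y
          · subst h2; simp [h1, Ne.symm h1]
          · simp [h1, h2, Ne.symm h1, Ne.symm h2, hxy, bne_iff_ne]
            push_cast; ring

lemma pv_Q_sum (xs : List Int) (x : Int) :
    ((PySem.List.pyRange 0 (xs.length : Int) 1).map (fun j =>
        ((PySem.List.pyRange (j + 1) (xs.length : Int) 1).map (fun k =>
          if some x ≠ PySem.List.pyGet? xs j ∧
             PySem.List.pyGet? xs j ≠ PySem.List.pyGet? xs k ∧
             some x ≠ PySem.List.pyGet? xs k then (1:Int) else 0)).sum)).sum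
      = pvQ xs x := by
  induction xs with
  | nil => simp [pvQ]
  | cons y ys ih =>
      rw [pv_sum_cons_shift]
      have hlen : (((y :: ys).length : Nat) : Int) = ((ys.length : Nat) : Int) + 1 := by
        simp [List.length_cons]
      -- head term (j = 0)
      have hhead : ((PySem.List.pyRange (0 + 1) (((y :: ys).length : Nat) : Int) 1).map (fun k =>
          if some x ≠ PySem.List.pyGet? (y :: ys) 0 ∧
             PySem.List.pyGet? (y :: ys) 0 ≠ PySem.List.pyGet? (y :: ys) k ∧
             some x ≠ PySem.List.pyGet? (y :: ys) k then (1:Int) else 0)).sum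
          = if y ≠ x then ((ys.countP (fun z => z != x && z != y) : Nat) : Int) else 0 := by
        rw [show (0 : Int) + 1 = 1 from by ring, hlen, pv_sum_shift1]
        rw [← pv_C_sum ys x y]
        refine pv_sum_congr (fun t ht => ?_)
        rw [PySem.List.pyGet?_zero_cons,
          pv_get_natCast y ys t (PySem.List.mem_pyRange_one.mp ht).1]
      -- shifted tail (j = t + 1)
      have htail : ((PySem.List.pyRange 0 ((ys.length : Nat) : Int) 1).map (fun t =>
          ((PySem.List.pyRange (t + 1 + 1) (((y :: ys).length : Nat) : Int) 1).map (fun k =>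
            if some x ≠ PySem.List.pyGet? (y :: ys) (t + 1) ∧
               PySem.List.pyGet? (y :: ys) (t + 1) ≠ PySem.List.pyGet? (y :: ys) k ∧
               some x ≠ PySem.List.pyGet? (y :: ys) k then (1:Int) else 0)).sum)).sum
          = pvQ ys x := by
        rw [← ih]
        refine pv_sum_congr (fun t ht => ?_)
        obtain ⟨ht0, _⟩ := PySem.List.mem_pyRange_one.mp ht
        rw [hlen, pv_sum_shift (t + 1) ((ys.length : Nat) : Int)]
        refine pv_sum_congr (fun k hk => ?_)
        obtain ⟨hk0, _⟩ := PySem.List.mem_pyRange_one.mp hk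
        rw [pv_get_natCast y ys t ht0, pv_get_natCast y ys k (by omega)]
      rw [hhead, htail, pvQ]

lemma pvInd_shift (x : Int) (xs : List Int) (i j k : Int)
    (hi : 0 ≤ i) (hj : 0 ≤ j) (hk : 0 ≤ k) :
    pvInd (x :: xs) (i + 1) (j + 1) (k + 1) = pvInd xs i j k := by
  unfold pvInd
  rw [pv_get_natCast x xs i hi, pv_get_natCast x xs j hj, pv_get_natCast x xs k hk]

lemma pvA3_eq_T (row : List Int) : pvA3 row = pvT row := by
  induction row with
  | nil => simp [pvA3, pvT]
  | cons x xs ih =>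
      unfold pvA3
      rw [pv_sum_cons_shift]
      have hlen : (((x :: xs).length : Nat) : Int) = ((xs.length : Nat) : Int) + 1 := by
        simp [List.length_cons]
      -- head term: triples whose first index is 0
      have hhead : pvA2 (x :: xs) 0 = pvQ xs x := by
        unfold pvA2 pvA1
        rw [← pv_Q_sum xs x, show (0 : Int) + 1 = 1 from by ring, hlen, pv_sum_shift1]
        refine pv_sum_congr (fun j hj => ?_)
        obtain ⟨hj0, _⟩ := PySem.List.mem_pyRange_one.mp hj
        rw [pv_sum_shift (j + 1) ((xs.length : Nat) : Int)]
        refine pv_sum_congr (fun k hk => ?_)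
        obtain ⟨hk0, _⟩ := PySem.List.mem_pyRange_one.mp hk
        unfold pvInd
        rw [PySem.List.pyGet?_zero_cons, pv_get_natCast x xs j hj0,
          pv_get_natCast x xs k (by omega)]
      -- shifted tail: triples whose first index is positive
      have htail : ((PySem.List.pyRange 0 ((xs.length : Nat) : Int) 1).map (fun t =>
          pvA2 (x :: xs) (t + 1))).sum = pvA3 xs := by
        unfold pvA3
        refine pv_sum_congr (fun i hi => ?_)
        obtain ⟨hi0, _⟩ := PySem.List.mem_pyRange_one.mp hi
        unfold pvA2 pvA1
        rw [hlen, pv_sum_shift (i + 1) ((xs.length : Nat) : Int)]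
        refine pv_sum_congr (fun j hj => ?_)
        obtain ⟨hj0, _⟩ := PySem.List.mem_pyRange_one.mp hj
        rw [pv_sum_shift (j + 1) ((xs.length : Nat) : Int)]
        refine pv_sum_congr (fun k hk => ?_)
        obtain ⟨hk0, _⟩ := PySem.List.mem_pyRange_one.mp hk
        exact pvInd_shift x xs i j k hi0 (by omega) (by omega)
      rw [hhead, htail, ih, pvT]

-- B-side: fold invariant --------------------------------------------------------

lemma pvB_loop (l : List Int) : ∀ (p : List Int) (d : PySem.Dict Int Int),
    (∀ v : Int, d.getD v 0 = (p.count v : Int)) →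
    (l.foldl pvStep (d, (p.length : Int), pvP p, pvT p)).2.2.2 = pvT (p ++ l) := by
  induction l with
  | nil => intro p d _; simp
  | cons x xs ih =>
      intro p d hd
      have hc : d.getD x 0 = (p.count x : Int) := hd x
      have hstep : pvStep (d, (p.length : Int), pvP p, pvT p) x
          = (d.insert x ((p.count x : Int) + 1), ((p ++ [x]).length : Int),
             pvP (p ++ [x]), pvT (p ++ [x])) := by
        have h1 : ((p.length : Int) + 1) = (((p ++ [x]).length : Nat) : Int) := by
          simp
        have h2 : pvP p + ((p.length : Int) - ((p.count x : Nat) : Int)) = pvP (p ++ [x]) := by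
          rw [pvP_snoc, pv_countP_ne]; try ring
        have h3 : pvT p + (pvP p - ((p.count x : Nat) : Int) *
            ((p.length : Int) - ((p.count x : Nat) : Int))) = pvT (p ++ [x]) := by
          rw [pvT_snoc, pvQ_eq]; try ring
        simp only [pvStep, hc]
        rw [h1, h2, h3]
      have hd' : ∀ v : Int, (d.insert x ((p.count x : Int) + 1)).getD v 0 = ((p ++ [x]).count v : Int) := by
        intro v
        rw [PySem.Dict.getD_insert]
        by_cases h : v = x <;> simp [h, Ne.symm, List.count_append, hd v] <;> push_cast <;>
          simp [List.count_singleton, h]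
      calc ((x :: xs).foldl pvStep (d, (p.length : Int), pvP p, pvT p)).2.2.2
          = (xs.foldl pvStep (pvStep (d, (p.length : Int), pvP p, pvT p) x)).2.2.2 := rfl
        _ = pvT ((p ++ [x]) ++ xs) := by rw [hstep]; exact ih (p ++ [x]) _ hd'
        _ = pvT (p ++ x :: xs) := by rw [List.append_assoc]; rfl

lemma pvCountB_eq_T (row : List Int) : pvCountB row = pvT row := by
  have h := pvB_loop row [] PySem.Dict.empty (by intro v; simp [PySem.Dict.getD])
  simpa [pvCountB, pvP, pvT] using h

lemma pv_counts_eq (row : List Int) : pvCountA row = pvCountB row := by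
  rw [pvCountA_eq_A3, pvA3_eq_T, pvCountB_eq_T]

-- ===== VERDICT (by name: the statement is the Claim_ definition above) =====
theorem longest_zeros_spec : Claim_equal_longest_zeros := by
  intro a b _
  unfold Spec_longest_zeros longest_zeros longest_zeros_alt
  rw [pv_counts_eq, pv_counts_eq]
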